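-- pv_equiv track=rewrite | github.com/JasterV/SARSCOV-HIERARCHY | src/python/utils/tree.py | build_relation
-- ===== SOURCE A (Python) =====
-- def build_relation(pair, table):
--     relation = dict()
--     for elem in pair:
--         for key, value in table[elem].items():
--             if key not in pair:
--                 relation.setdefault(key, []).append(value)
--     relation = {key: min(relation[key]) for key in relation}
--     return relation
-- ===== SOURCE B (Python) =====
-- def build_relation(pair, table):
--     items = [kv for elem in pair for kv in table[elem].items()]
--     keys = []
--     for key, _ in items:
--         if key not in pair and key not in keys:
--             keys.append(key)
--     return {key: min(v for k, v in items if k == key) for key in keys}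
-- ===== Notes on version B (the rewrite author's own statement) =====
-- stated objective: alternative
-- what changed: A groups values into per-key bucket lists in one dict-building pass and then reduces each bucket with min; B builds no buckets at all: it flattens the items once, collects the outside keys in first-occurrence order, and computes each key's minimum by an independent re-scan of the flat item list.
import Mathlib
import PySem

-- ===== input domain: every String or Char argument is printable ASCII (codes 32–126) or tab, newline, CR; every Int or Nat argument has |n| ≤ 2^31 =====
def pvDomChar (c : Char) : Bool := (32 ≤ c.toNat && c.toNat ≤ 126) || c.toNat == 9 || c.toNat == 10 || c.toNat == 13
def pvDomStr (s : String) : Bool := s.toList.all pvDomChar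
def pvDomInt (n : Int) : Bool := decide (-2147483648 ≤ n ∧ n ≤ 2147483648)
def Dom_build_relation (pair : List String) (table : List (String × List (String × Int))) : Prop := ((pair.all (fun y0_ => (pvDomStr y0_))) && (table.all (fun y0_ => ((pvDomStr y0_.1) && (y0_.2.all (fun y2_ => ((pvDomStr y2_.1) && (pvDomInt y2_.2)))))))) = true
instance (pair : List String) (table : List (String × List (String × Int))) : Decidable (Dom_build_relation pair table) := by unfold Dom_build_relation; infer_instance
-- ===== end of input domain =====

-- B replaces A's single-pass bucket dict (group values per key, then min each bucket) with a
-- flat item list, an ordered key-discovery pass, and an independent per-key min re-scan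
-- (objective: alternative; no bucket dict at all).

-- ===== PORT A =====
-- A: relation = dict of value LISTS built by setdefault/append inside two nested loops, then a
-- second pass taking min of each list. min(l) is PySem.List.min? with identity key; the .getD 0
-- totalization is never reached (every bucket is nonempty). table[elem] (KeyError if the key is
-- absent) is ported total as getD elem []; Pre_ excludes exactly the KeyError inputs.
def build_relation (pair : List String) (table : List (String × List (String × Int))) : List (String × Int) :=
  let relation : PySem.Dict String (List Int) :=
    pair.foldl (fun relation elem =>
      ((PySem.Dict.mk table).getD elem []).foldl (fun relation kv =>
        if !(pair.contains kv.1) then relation.modify kv.1 [] (fun vs => vs ++ [kv.2])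
        else relation) relation)
      PySem.Dict.empty
  relation.items.map (fun p => (p.1, (PySem.List.min? p.2 (fun y => y)).getD 0))

-- ===== PORT B =====
-- B: flatten all items, collect outside keys in first-occurrence order (a plain list, no dict),
-- then compute each key's min by re-scanning the flat item list. min(generator) is min? over the
-- filtered values, .getD 0 never reached (each key occurs in items).
def build_relation_alt (pair : List String) (table : List (String × List (String × Int))) : List (String × Int) :=
  let items : List (String × Int) :=
    pair.flatMap (fun elem => (PySem.Dict.mk table).getD elem [])
  let keys : List String :=
    items.foldl (fun keys kv =>
      if !(pair.contains kv.1) && !(keys.contains kv.1) then keys ++ [kv.1] else keys) []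
  keys.map (fun key =>
    (key, (PySem.List.min? ((items.filter (fun kv => kv.1 == key)).map (fun kv => kv.2)) (fun y => y)).getD 0))

-- ===== PRECONDITION & SPEC =====
-- Pre_: every element of pair is a key of table — exactly where Python A's table[elem] does not raise KeyError.
def Pre_build_relation (pair : List String) (table : List (String × List (String × Int))) : Prop :=
  ∀ e ∈ pair, ∃ p ∈ table, p.1 = e
instance (pair : List String) (table : List (String × List (String × Int))) : Decidable (Pre_build_relation pair table) := by unfold Pre_build_relation; infer_instance

def pvWitness_build_relation : List String × (List (String × List (String × Int))) :=
  (["a", "b"], [("a", [("c", 3)]), ("b", [("c", 1), ("d", 5)])])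

def Spec_build_relation (pair : List String) (table : List (String × List (String × Int))) (out : List (String × Int)) : Prop := out = build_relation_alt pair table
instance (pair : List String) (table : List (String × List (String × Int))) (out : List (String × Int)) : Decidable (Spec_build_relation pair table out) := by unfold Spec_build_relation; infer_instance

-- ===== CLAIM (what is proved, stated in full; the proofs are below) =====
def Claim_equal_build_relation : Prop := ∀ (pair : List String) (table : List (String × List (String × Int))), Dom_build_relation pair table → Pre_build_relation pair table → Spec_build_relation pair table (build_relation pair table)

-- ===== LEMMAS AND PROOFS =====

-- B's key-discovery fold over the raw items is Set.ofList of the keys of the pair-filtered items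
theorem pvKeys_fold (pair : List String) (items : List (String × Int)) :
    ∀ (acc : List String),
    items.foldl (fun keys kv =>
      if !(pair.contains kv.1) && !(keys.contains kv.1) then keys ++ [kv.1] else keys) acc
    = (items.filter (fun kv => !(pair.contains kv.1))).foldl
        (fun s kv => PySem.Set.add s kv.1) acc := by
  induction items with
  | nil => intro acc; rfl
  | cons kv rest ih =>
    intro acc
    rw [List.foldl_cons, List.filter_cons]
    cases hp : pair.contains kv.1 with
    | true =>
      rw [if_neg (by simp), if_neg (by simp)]
      exact ih acc
    | false =>
      cases hk : acc.contains kv.1 with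
      | true =>
        rw [if_neg (by simp), if_pos (by simp), List.foldl_cons,
          show PySem.Set.add acc kv.1 = acc from
            PySem.Set.add_of_mem (by have := hk; simp at this; exact this)]
        exact ih acc
      | false =>
        rw [if_pos (by simp), if_pos (by simp), List.foldl_cons,
          show PySem.Set.add acc kv.1 = acc ++ [kv.1] from
            PySem.Set.add_of_not_mem (by have := hk; simp at this; exact this)]
        exact ih (acc ++ [kv.1])

-- filtering by an outside key commutes with the pair filter
theorem pvFilter_key (pair : List String) (items : List (String × Int)) (k : String)
    (hk : k ∉ pair) :
    (items.filter (fun kv => !(pair.contains kv.1))).filter (fun kv => kv.1 == k)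
      = items.filter (fun kv => kv.1 == k) := by
  rw [List.filter_filter]
  apply List.filter_congr
  intro p _
  by_cases h : p.1 = k
  · simp [h, hk]
  · simp [h]

-- ===== VERDICT (by name: the statement is the Claim_ definition above) =====
theorem build_relation_spec : Claim_equal_build_relation := by
  intro pair table _ _
  show build_relation pair table = build_relation_alt pair table
  unfold build_relation build_relation_alt
  dsimp only
  set items : List (String × Int) :=
    pair.flatMap (fun elem => (PySem.Dict.mk table).getD elem []) with hitems
  set S : List (String × Int) := items.filter (fun kv => !(pair.contains kv.1)) with hS
  -- A's nested loops are a modify-append fold over S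
  have hA : pair.foldl (fun relation elem =>
      ((PySem.Dict.mk table).getD elem []).foldl (fun relation kv =>
        if !(pair.contains kv.1) then relation.modify kv.1 [] (fun vs => vs ++ [kv.2])
        else relation) relation) PySem.Dict.empty
      = S.foldl (fun d p => d.modify p.1 [] (fun vs => vs ++ [p.2])) PySem.Dict.empty := by
    rw [hS, hitems, List.foldl_filter, List.foldl_flatMap]
  rw [hA]
  set DA := S.foldl (fun d p => d.modify p.1 [] (fun vs => vs ++ [p.2])) PySem.Dict.empty with hDA
  have hkeys : DA.keys = PySem.Set.ofList (S.map (fun kv => kv.1)) := by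
    rw [hDA, PySem.Dict.keys_foldl_modify_key]
    simp [PySem.Set.update_nil_left, PySem.Dict.keys_empty]
  have hnd : DA.keys.Nodup := by
    rw [hkeys]; exact PySem.Set.nodup_ofList _
  have hitemsDA : DA.items = DA.keys.map (fun k => (k, DA.getD k [])) :=
    PySem.Dict.items_eq_map_keys DA hnd []
  have hget : ∀ k, DA.getD k [] = (S.filter (fun p => p.1 == k)).map (fun p => p.2) := by
    intro k
    rw [hDA, PySem.Dict.getD_foldl_modify_append]
    simp [PySem.Dict.getD_empty]
  -- B's key list
  have hB : items.foldl (fun keys kv =>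
      if !(pair.contains kv.1) && !(keys.contains kv.1) then keys ++ [kv.1] else keys) []
      = PySem.Set.ofList (S.map (fun kv => kv.1)) := by
    rw [pvKeys_fold, ← hS,
      ← PySem.Set.update_map_eq_foldl_add (s := ([] : List String)) (l := S)
        (f := fun kv : String × Int => kv.1),
      PySem.Set.update_nil_left]
  rw [hB, hitemsDA, hkeys, List.map_map]
  apply List.map_congr_left
  intro k hkmem
  have hkS : k ∈ S.map (fun kv => kv.1) := (PySem.Set.mem_ofList _ _).mp hkmem
  obtain ⟨p, hpS, hpk⟩ := List.mem_map.mp hkS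
  have hout : k ∉ pair := by
    have := List.of_mem_filter hpS
    rw [hpk] at this
    simpa using this
  simp only [Function.comp]
  rw [hget k, ← pvFilter_key pair items k hout, ← hS]
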